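-- pv_equiv track=rewrite | github.com/FireEmblemUniverse/fireemblem8u | scripts/replace_proc_data.py | chunk_proc_scripts
-- ===== SOURCE A (Python) =====
-- def chunk_proc_scripts(f):
--     scripts = []
--     current_script = []
--     current_script_loc = None
--
--     for line in f:
--         if line.startswith("Found script"):
--             if current_script_loc is not None:
--                 scripts.append((current_script_loc, "".join(current_script)))
--             current_script = []
--             current_script_loc = line.split()[-1]
--         else:
--             current_script.append(line)
--
--     scripts.append((current_script_loc, "".join(current_script)))
--
--     return scripts
-- ===== SOURCE B (Python) =====
-- def chunk_proc_scripts(f):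
--     lines = list(f)
--     if not any(l.startswith("Found script") for l in lines):
--         return [(None, "".join(lines))]
--     rest = _drop_prefix(lines)
--     out = []
--     while rest:
--         head, tail = rest[0], rest[1:]
--         body, rest = _take_body(tail)
--         out.append((head.split()[-1], "".join(body)))
--     return out
--
-- def _drop_prefix(ls):
--     while not ls[0].startswith("Found script"):
--         ls = ls[1:]
--     return ls
--
-- def _take_body(ls):
--     for i, l in enumerate(ls):
--         if l.startswith("Found script"):
--             return ls[:i], ls[i:]
--     return ls, []
-- ===== Notes on version B (the rewrite author's own statement) =====
-- stated objective: alternative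
-- what changed: B is staged: it first checks whether any marker line exists, drops the prefix before the first marker, then repeatedly splits off one whole (marker, body-slice) chunk with a take-until-next-marker helper, instead of A's single streaming pass that maintains an open current_script buffer and current_script_loc state.
-- outside the precondition, e.g. on chunk_proc_scripts([]): A returns [(None, '')], B returns [(None, '')]; on chunk_proc_scripts(['x\n']): A returns [(None, 'x\n')], B returns [(None, 'x\n')]
import Mathlib
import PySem

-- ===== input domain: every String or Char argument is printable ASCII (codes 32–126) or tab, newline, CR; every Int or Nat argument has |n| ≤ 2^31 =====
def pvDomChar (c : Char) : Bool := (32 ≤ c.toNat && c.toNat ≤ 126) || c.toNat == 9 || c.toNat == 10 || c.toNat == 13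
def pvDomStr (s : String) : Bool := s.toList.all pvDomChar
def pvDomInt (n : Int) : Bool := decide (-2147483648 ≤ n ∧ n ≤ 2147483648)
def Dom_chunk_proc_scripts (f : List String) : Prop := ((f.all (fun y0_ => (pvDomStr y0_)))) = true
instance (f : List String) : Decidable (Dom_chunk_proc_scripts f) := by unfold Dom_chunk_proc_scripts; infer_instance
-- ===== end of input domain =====

-- B splits the input in stages (any-marker check, drop the pre-marker prefix, then repeatedly
-- split off one whole chunk at the next marker) instead of A's streaming open-chunk accumulator;
-- return values proved equal on inputs containing a marker line.


-- shared primitive helpers (both Pythons use the same built-ins)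
def pvIsMarker (l : String) : Bool := PySem.Str.startswith l "Found script"
-- line.split()[-1]; Python's IndexError (empty split) is unreachable on marker lines, defaulted to ""
def pvLastWord (l : String) : String := (PySem.List.pyGet? (PySem.Str.split₀ l) (-1)).getD ""
def pvJoin (xs : List String) : String := PySem.Str.join "" xs

-- ===== PORT A =====
-- state: (scripts, current_script, current_script_loc)
def pvStepA (st : List (String × String) × List String × Option String) (line : String) :
    List (String × String) × List String × Option String :=
  if pvIsMarker line then
    (match st.2.2 with
     | some a => st.1 ++ [(a, pvJoin st.2.1)]
     | none => st.1,
     [], some (pvLastWord line))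
  else (st.1, st.2.1 ++ [line], st.2.2)

def chunk_proc_scripts (f : List String) : List (String × String) :=
  let st := f.foldl pvStepA ([], [], none)
  -- final unconditional append; Python's None location (excluded by Pre_) rendered as ""
  st.1 ++ [(st.2.2.getD "", pvJoin st.2.1)]

-- ===== PORT B =====
-- _take_body: 'for i, l in enumerate(ls): if marker: return ls[:i], ls[i:]' / 'return ls, []'
def pvTakeBodyGo : List String → Nat → Option Nat
  | [], _ => none
  | l :: rest, i => if pvIsMarker l then some i else pvTakeBodyGo rest (i + 1)

def pvTakeBody (ls : List String) : List String × List String :=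
  match pvTakeBodyGo ls 0 with
  | some i => (ls.take i, ls.drop i)   -- ls[:i], ls[i:] with 0 ≤ i ≤ len: exactly List.take/drop
  | none => (ls, [])

-- _drop_prefix: 'while not ls[0].startswith(...): ls = ls[1:]' (guarded nonempty by the any-check)
def pvDropPrefix : List String → List String
  | [] => []
  | l :: rest => if pvIsMarker l then l :: rest else pvDropPrefix rest

theorem pvTakeBody_len (ls : List String) : (pvTakeBody ls).2.length ≤ ls.length := by
  unfold pvTakeBody
  cases pvTakeBodyGo ls 0 <;> simp

-- the main 'while rest:' loop, with 'out' the accumulator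
def pvChunks : List String → List (String × String) → List (String × String)
  | [], out => out
  | head :: tail, out =>
    pvChunks (pvTakeBody tail).2 (out ++ [(pvLastWord head, pvJoin (pvTakeBody tail).1)])
termination_by rest _ => rest.length
decreasing_by exact Nat.lt_succ_of_le (pvTakeBody_len tail)

def chunk_proc_scripts_alt (f : List String) : List (String × String) :=
  let lines := f
  if !(lines.any (fun l => pvIsMarker l)) then
    -- Python returns [(None, …)] here (excluded by Pre_); None rendered as ""
    [("", pvJoin lines)]
  else
    pvChunks (pvDropPrefix lines) []

-- ===== PRECONDITION & SPEC =====
-- Pre_ excludes inputs with no line starting with "Found script": there Python A (and B) return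
-- [(None, ...)] whose first component is None, not a str, so it is outside the declared return type.
def Pre_chunk_proc_scripts (f : List String) : Prop := ∃ l ∈ f, pvIsMarker l = true
instance (f : List String) : Decidable (Pre_chunk_proc_scripts f) := by
  unfold Pre_chunk_proc_scripts; infer_instance

def pvWitness_chunk_proc_scripts : List String := ["Found script at 0x123\n", "line\n"]

def Spec_chunk_proc_scripts (f : List String) (out : List (String × String)) : Prop := out = chunk_proc_scripts_alt f
instance (f : List String) (out : List (String × String)) : Decidable (Spec_chunk_proc_scripts f out) := by unfold Spec_chunk_proc_scripts; infer_instance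

-- ===== CLAIM (what is proved, stated in full; the proofs are below) =====
def Claim_equal_chunk_proc_scripts : Prop := ∀ (f : List String), Dom_chunk_proc_scripts f → Pre_chunk_proc_scripts f → Spec_chunk_proc_scripts f (chunk_proc_scripts f)

-- ===== LEMMAS AND PROOFS =====

-- common characterisation: pvG f = (chunks fully delimited inside f, prefix of f before its first marker)
def pvG : List String → List (String × String) × List String
  | [] => ([], [])
  | l :: rest =>
    if pvIsMarker l then ((pvLastWord l, pvJoin (pvG rest).2) :: (pvG rest).1, [])
    else ((pvG rest).1, l :: (pvG rest).2)

-- what A produces when it still has open state (loc, cur) and input f remains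
def pvH (loc : Option String) (cur : List String) (f : List String) : List (String × String) :=
  if (pvG f).1 = [] then [(loc.getD "", pvJoin (cur ++ (pvG f).2))]
  else (match loc with | some a => [(a, pvJoin (cur ++ (pvG f).2))] | none => []) ++ (pvG f).1

theorem pvA_inv (f : List String) : ∀ (scripts : List (String × String)) (cur : List String) (loc : Option String),
    (let st := f.foldl pvStepA (scripts, cur, loc); st.1 ++ [(st.2.2.getD "", pvJoin st.2.1)])
      = scripts ++ pvH loc cur f := by
  induction f with
  | nil => intro scripts cur loc; simp [pvH, pvG]
  | cons l rest ih =>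
    intro scripts cur loc
    simp only [List.foldl_cons]
    by_cases hm : pvIsMarker l = true
    · rw [show pvStepA (scripts, cur, loc) l
          = ((match loc with | some a => scripts ++ [(a, pvJoin cur)] | none => scripts),
             [], some (pvLastWord l)) from by simp [pvStepA, hm]]
      rw [ih]
      cases loc <;> by_cases hp : (pvG rest).1 = [] <;> simp [pvH, pvG, hm, hp]
    · rw [show pvStepA (scripts, cur, loc) l = (scripts, cur ++ [l], loc) from by
        simp [pvStepA, hm]]
      rw [ih]
      cases loc <;> by_cases hp : (pvG rest).1 = [] <;> simp [pvH, pvG, hm, hp]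

-- index scan shift: the scan starting at i returns the start-at-0 answer shifted by i
theorem pvTakeBodyGo_shift (ls : List String) : ∀ i : Nat,
    pvTakeBodyGo ls i = (pvTakeBodyGo ls 0).map (· + i) := by
  induction ls with
  | nil => intro i; simp [pvTakeBodyGo]
  | cons l rest ih =>
    intro i
    by_cases hm : pvIsMarker l = true
    · simp [pvTakeBodyGo, hm]
    · simp only [pvTakeBodyGo, hm, Bool.false_eq_true, if_false]
      rw [ih (i + 1), ih 1]
      cases pvTakeBodyGo rest 0 <;> simp <;> omega

-- structural characterisation of the index-based _take_body
theorem pvTakeBody_cons (l : String) (rest : List String) :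
    pvTakeBody (l :: rest)
      = if pvIsMarker l then ([], l :: rest)
        else (l :: (pvTakeBody rest).1, (pvTakeBody rest).2) := by
  by_cases hm : pvIsMarker l = true
  · simp [pvTakeBody, pvTakeBodyGo, hm]
  · simp only [pvTakeBody, pvTakeBodyGo, hm, Bool.false_eq_true, if_false]
    rw [pvTakeBodyGo_shift rest 1]
    cases pvTakeBodyGo rest 0 <;> simp

-- pure (accumulator-free) form of the chunk loop, with fuel for easy induction
def pvChunksPure : Nat → List String → List (String × String)
  | _, [] => []
  | 0, _ :: _ => []
  | n + 1, head :: tail =>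
    (pvLastWord head, pvJoin (pvTakeBody tail).1) :: pvChunksPure n (pvTakeBody tail).2

-- _take_body against pvG: body = prefix before first marker, remainder's chunks = pvG's chunks
theorem pvTakeBody_G (ls : List String) :
    (pvTakeBody ls).1 = (pvG ls).2 ∧
    (∀ n, (pvTakeBody ls).2.length ≤ n →
      (pvChunksPure n (pvTakeBody ls).2) = (pvG ls).1) := by
  induction ls with
  | nil =>
    refine ⟨by simp [pvTakeBody, pvTakeBodyGo, pvG], ?_⟩
    intro n _
    cases n <;> simp [pvTakeBody, pvTakeBodyGo, pvChunksPure, pvG]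
  | cons l rest ih =>
    rw [pvTakeBody_cons]
    by_cases hm : pvIsMarker l = true
    · refine ⟨by simp [pvG, hm], ?_⟩
      intro n hn
      simp only [hm, if_true] at hn ⊢
      cases n with
      | zero => simp at hn
      | succ m =>
        simp only [pvChunksPure, pvG, hm, if_true]
        have hgoal : (pvLastWord l, pvJoin (pvTakeBody rest).1) :: pvChunksPure m (pvTakeBody rest).2
            = (pvLastWord l, pvJoin (pvG rest).2) :: (pvG rest).1 := by
          rw [ih.1, ih.2 m (le_trans (pvTakeBody_len rest) (by simpa using hn))]
        simpa [pvChunksPure, pvG, hm] using hgoal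
    · refine ⟨by simp [pvG, hm, ih.1], ?_⟩
      intro n hn
      simp only [hm, Bool.false_eq_true, if_false] at hn ⊢
      rw [ih.2 n hn]
      simp [pvG, hm]


theorem pvChunks_acc : ∀ (n : Nat) (rest : List String) (out : List (String × String)),
    rest.length ≤ n → pvChunks rest out = out ++ pvChunksPure n rest := by
  intro n
  induction n with
  | zero =>
    intro rest out h
    have : rest = [] := List.eq_nil_of_length_eq_zero (Nat.le_zero.mp h)
    subst this; simp [pvChunks, pvChunksPure]
  | succ m ih =>
    intro rest out h
    cases rest with
    | nil => simp [pvChunks, pvChunksPure]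
    | cons head tail =>
      rw [pvChunks, ih _ _ (le_trans (pvTakeBody_len tail) (by simpa using h))]
      simp [pvChunksPure]

theorem pvDropPrefix_eq (ls : List String) : pvDropPrefix ls = (pvTakeBody ls).2 := by
  induction ls with
  | nil => simp [pvDropPrefix, pvTakeBody, pvTakeBodyGo]
  | cons l rest ih =>
    rw [pvTakeBody_cons]
    by_cases hm : pvIsMarker l = true <;> simp [pvDropPrefix, hm, ih]

theorem pvG_ne_nil (f : List String) (h : ∃ l ∈ f, pvIsMarker l = true) : (pvG f).1 ≠ [] := by
  induction f with
  | nil => simp at h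
  | cons l rest ih =>
    by_cases hm : pvIsMarker l = true
    · simp [pvG, hm]
    · simp only [pvG, hm, Bool.false_eq_true, if_false]
      rcases h with ⟨x, hx, hxm⟩
      rcases List.mem_cons.mp hx with rfl | hx2
      · exact absurd hxm hm
      · exact ih ⟨x, hx2, hxm⟩

-- ===== VERDICT (by name: the statement is the Claim_ definition above) =====
theorem chunk_proc_scripts_spec : Claim_equal_chunk_proc_scripts := by
  intro f _ hpre
  show chunk_proc_scripts f = chunk_proc_scripts_alt f
  rcases hpre with ⟨l, hl, hm⟩
  have hany : f.any (fun l => pvIsMarker l) = true := List.any_eq_true.mpr ⟨l, hl, hm⟩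
  have hA := pvA_inv f [] [] none
  simp only [chunk_proc_scripts] at *
  rw [hA]
  have hne : (pvG f).1 ≠ [] := pvG_ne_nil f ⟨l, hl, hm⟩
  simp only [chunk_proc_scripts_alt, hany, Bool.not_true, Bool.false_eq_true, if_false]
  rw [pvDropPrefix_eq,
      pvChunks_acc (pvTakeBody f).2.length (pvTakeBody f).2 [] (le_refl _),
      (pvTakeBody_G f).2 (pvTakeBody f).2.length (le_refl _)]
  simp [pvH, hne]
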